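-- pv_equiv track=rewrite | github.com/akashkthkr/MWDB_Group1 | Phase3/pprc.py | filter_by_X
-- ===== SOURCE A (Python) =====
-- def filter_by_X(data):
--     result = {}
--
--     for item in data:
--         label = item.split('-')[1]
--         try:
--             result[f"{label}"].append(item)
--         except:
--             result[f"{label}"] = []
--             result[f"{label}"].append(item)
--
--     return result
-- ===== SOURCE B (Python) =====
-- def filter_by_X(data):
--     labels = list(dict.fromkeys(item.split('-')[1] for item in data))
--     return {label: [item for item in data if item.split('-')[1] == label]
--             for label in labels}
-- ===== Notes on version B (the rewrite author's own statement) =====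
-- stated objective: alternative
-- what changed: Replaces the single try/except dict-accumulation pass with a two-phase strategy: first collect the distinct labels in order of first occurrence (dict.fromkeys), then build each group by a filtering comprehension over the data.
import Mathlib
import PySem

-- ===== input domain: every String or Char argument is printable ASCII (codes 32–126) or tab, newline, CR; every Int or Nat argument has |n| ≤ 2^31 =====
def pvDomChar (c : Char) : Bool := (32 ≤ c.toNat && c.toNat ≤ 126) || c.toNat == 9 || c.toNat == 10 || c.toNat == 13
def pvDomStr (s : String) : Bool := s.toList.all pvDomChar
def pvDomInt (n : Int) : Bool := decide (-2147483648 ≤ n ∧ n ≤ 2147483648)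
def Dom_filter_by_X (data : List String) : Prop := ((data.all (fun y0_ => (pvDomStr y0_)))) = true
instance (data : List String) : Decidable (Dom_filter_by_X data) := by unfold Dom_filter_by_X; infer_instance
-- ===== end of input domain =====

-- B groups by first collecting the distinct labels in first-occurrence order and then
-- filtering the data once per label, instead of A's try/except dict-accumulation pass
-- (objective: alternative decomposition, same return value).

-- item.split('-')[1] ; none = IndexError (the separator "-" is nonempty, so split? never returns none)
def pvLabel? (s : String) : Option String :=
  match PySem.Str.split? s "-" with
  | some parts => PySem.List.pyGet? parts 1
  | none => none

-- ===== PORT A =====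
def filter_by_X (data : List String) : List (String × List String) :=
  (data.foldl (fun (result : PySem.Dict String (List String)) item =>
      match pvLabel? item with
      | none => result  -- Python raises IndexError here; excluded by Pre_
      | some label =>
        match result.get? label with
        | some lst => result.insert label (lst ++ [item])                  -- try: result[label].append(item)
        | none => (result.insert label []).insert label ([] ++ [item])     -- except: result[label] = []; append
    ) PySem.Dict.empty).items

-- ===== PORT B =====
def filter_by_X_alt (data : List String) : List (String × List String) :=
  let labels := PySem.List.dedup (data.filterMap pvLabel?)  -- list(dict.fromkeys(...)); skip = raising item, excluded by Pre_
  labels.map (fun label => (label, data.filter (fun item => pvLabel? item == some label)))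

-- ===== PRECONDITION & SPEC =====
-- Pre_ excludes exactly the inputs where A raises IndexError: an item whose split('-') has
-- no second element, i.e. an item containing no '-'.
def Pre_filter_by_X (data : List String) : Prop :=
  ∀ item ∈ data, 1 < ((PySem.Str.split? item "-").getD []).length
instance (data : List String) : Decidable (Pre_filter_by_X data) := by unfold Pre_filter_by_X; infer_instance

def pvWitness_filter_by_X : List String := ["a-x", "b-y", "c-x"]

def Spec_filter_by_X (data : List String) (out : List (String × List String)) : Prop := out = filter_by_X_alt data
instance (data : List String) (out : List (String × List String)) : Decidable (Spec_filter_by_X data out) := by unfold Spec_filter_by_X; infer_instance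

-- ===== CLAIM (what is proved, stated in full; the proofs are below) =====
def Claim_equal_filter_by_X : Prop := ∀ (data : List String), Dom_filter_by_X data → Pre_filter_by_X data → Spec_filter_by_X data (filter_by_X data)

-- ===== LEMMAS AND PROOFS =====

-- proof-only total label function; under Pre_ it agrees with pvLabel?
def pvLab (s : String) : String := (pvLabel? s).getD ""

theorem pvLabel?_eq_some (s : String)
    (h : 1 < ((PySem.Str.split? s "-").getD []).length) :
    pvLabel? s = some (pvLab s) := by
  obtain ⟨parts, hp⟩ : ∃ parts, PySem.Str.split? s "-" = some parts := by
    simp [PySem.Str.split?, PySem.Chars.split?]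
  rw [hp] at h
  simp only [Option.getD_some] at h
  have hg : pvLabel? s = some parts[1] := by
    unfold pvLabel?
    rw [hp]
    simpa using PySem.List.pyGet?_ofNat parts (n := 1) h
  rw [hg]
  simp [pvLab, hg]

-- A's loop body, under Pre_, is exactly a 'modify label [] (· ++ [item])'
theorem stepA_eq_modify (d : PySem.Dict String (List String)) (item : String)
    (h : pvLabel? item = some (pvLab item)) :
    (match pvLabel? item with
      | none => d
      | some label =>
        match d.get? label with
        | some lst => d.insert label (lst ++ [item])
        | none => (d.insert label []).insert label ([] ++ [item])) =
    d.modify (pvLab item) [] (· ++ [item]) := by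
  rw [h]
  have hmod : d.modify (pvLab item) [] (· ++ [item]) =
      d.insert (pvLab item) (d.getD (pvLab item) [] ++ [item]) := by
    simp [PySem.Dict.modify, PySem.Dict.getD]
  dsimp only
  cases hget : d.get? (pvLab item) with
  | some lst =>
      rw [hmod, PySem.Dict.getD_of_get?_eq_some d [] hget]
  | none =>
      rw [hmod, PySem.Dict.getD_of_get?_eq_none d [] hget,
        PySem.Dict.insert_insert_self]

-- ===== VERDICT (by name: the statement is the Claim_ definition above) =====
-- ===== VERDICT =====
theorem filter_by_X_spec : Claim_equal_filter_by_X := by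
  intro data _hdom hpre
  unfold Spec_filter_by_X filter_by_X filter_by_X_alt
  have hlab : ∀ item ∈ data, pvLabel? item = some (pvLab item) := by
    intro item hmem; exact pvLabel?_eq_some item (hpre item hmem)
  -- rewrite A's fold into the canonical modify-fold over key/value pairs
  rw [PySem.List.foldl_congr_mem data _
      (fun d item => d.modify (pvLab item) [] (· ++ [item])) PySem.Dict.empty
      (fun acc x hx => stepA_eq_modify acc x (hlab x hx))]
  rw [show (data.foldl (fun d item => d.modify (pvLab item) [] (· ++ [item])) PySem.Dict.empty)
      = ((data.map (fun it => (pvLab it, it))).foldl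
          (fun d p => d.modify p.1 [] (· ++ [p.2])) PySem.Dict.empty) by
    rw [List.foldl_map]]
  set D := (data.map (fun it => (pvLab it, it))).foldl
      (fun d p => d.modify p.1 [] (· ++ [p.2])) PySem.Dict.empty with hD
  -- keys of D: the distinct labels in first-occurrence order
  have hkeys : D.keys = PySem.Set.ofList (data.map pvLab) := by
    rw [hD, List.foldl_map,
      PySem.Dict.keys_foldl_modify_key data pvLab [] (fun _ x v => v ++ [x]) PySem.Dict.empty]
    simp [PySem.Set.update_nil_left]
  have hnodup : D.keys.Nodup := by rw [hkeys]; exact PySem.Set.nodup_ofList _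
  -- value of D at each key: the filtered sublist
  have hgetD : ∀ c, D.getD c [] = data.filter (fun it => pvLab it == c) := by
    intro c
    rw [hD, PySem.Dict.getD_foldl_modify_append]
    rw [List.filter_map]
    simp [List.map_map, Function.comp_def]
  -- B's label list equals D's key list
  have hfm : data.filterMap pvLabel? = data.map pvLab := by
    rw [List.filterMap_congr (g := fun s => (some ∘ pvLab) s) (fun a ha => hlab a ha),
      List.filterMap_eq_map]
  rw [PySem.Dict.items_eq_map_keys D hnodup [], hkeys]
  simp only [PySem.List.dedup_eq_ofList, hfm]
  refine List.map_congr_left ?_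
  intro k _
  rw [hgetD k]
  refine congrArg _ (List.filter_congr ?_)
  intro item hmem
  rw [hlab item hmem]
  simp
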